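-- pv_equiv track=rewrite | github.com/ManaswiniPattanaik898/DSA | Difficulty: Basic/Type of array/type-of-array.py | maxNtype
-- ===== SOURCE A (Python) =====
-- def maxNtype(arr):
--     #code here.
--     n=len(arr)
--     asc,desc=True,True
--     for i in range(1,n):
--         if arr[i]>arr[i-1]:
--             desc=False
--         elif arr[i]<arr[i-1]:
--             asc=False
--     if asc:
--         return 1
--     if desc:
--         return 2
--     min_index=arr.index(min(arr))
--     max_index=arr.index(max(arr))
--
--     if max_index+1==min_index:
--         return 4
--     else:
--         return 3
-- ===== SOURCE B (Python) =====
-- def maxNtype(arr):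
--     s = sorted(arr)
--     if arr == s:
--         return 1
--     if arr == list(reversed(s)):
--         return 2
--     return 4 if arr.index(s[-1]) + 1 == arr.index(s[0]) else 3
-- ===== Notes on version B (the rewrite author's own statement) =====
-- stated objective: simpler
-- what changed: Replaces A's flag-carrying scan plus min()/max() scans by a sort-based classification: compare arr with sorted(arr) and its reversal to detect the monotone cases, and read the extreme values off the ends of the sorted copy for the rotated test.
import Mathlib
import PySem

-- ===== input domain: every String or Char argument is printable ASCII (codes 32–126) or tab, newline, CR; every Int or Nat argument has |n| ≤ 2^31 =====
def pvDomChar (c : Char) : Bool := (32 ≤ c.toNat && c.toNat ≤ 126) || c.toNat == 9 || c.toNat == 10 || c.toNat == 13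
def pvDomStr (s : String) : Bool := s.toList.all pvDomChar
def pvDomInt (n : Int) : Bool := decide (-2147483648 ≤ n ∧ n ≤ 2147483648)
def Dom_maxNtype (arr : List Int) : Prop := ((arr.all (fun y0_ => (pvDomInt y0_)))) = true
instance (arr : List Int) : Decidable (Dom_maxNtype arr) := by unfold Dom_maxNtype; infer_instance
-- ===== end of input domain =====

-- B classifies by sorting: arr vs sorted(arr) / its reversal for the monotone cases, the sorted
-- copy's ends as min/max for the rotated test — instead of A's flag scan plus min()/max() scans
-- (objective: simpler; not faster).

-- ===== PORT A =====
def maxNtype (arr : List Int) : Int :=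
  let n : Int := arr.length
  let sd : Bool × Bool := (PySem.List.pyRange 1 n 1).foldl
    (fun st i =>
      if PySem.List.pyGetD arr i 0 > PySem.List.pyGetD arr (i-1) 0 then (st.1, false)
      else if PySem.List.pyGetD arr i 0 < PySem.List.pyGetD arr (i-1) 0 then (false, st.2)
      else st) (true, true)
  if sd.1 then 1
  else if sd.2 then 2
  else
    match PySem.List.min? arr (fun x => x), PySem.List.max? arr (fun x => x) with
    | some mn, some mx =>
        let min_index : Int := ((PySem.List.index? arr mn).getD 0 : Nat)
        let max_index : Int := ((PySem.List.index? arr mx).getD 0 : Nat)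
        if max_index + 1 == min_index then 4 else 3
    | _, _ => 0   -- unreachable: min()/max() raise only on [], but on [] the function returned 1 already

-- ===== PORT B =====
def maxNtype_alt (arr : List Int) : Int :=
  let s := PySem.List.sorted arr (fun x => x) false
  if arr == s then 1
  else if arr == s.reverse then 2
  else
    let mx := PySem.List.pyGetD s (-1) 0   -- s[-1]; s ≠ [] here since arr ≠ s forces arr ≠ []
    let mn := PySem.List.pyGetD s 0 0      -- s[0]
    let max_index : Int := ((PySem.List.index? arr mx).getD 0 : Nat)
    let min_index : Int := ((PySem.List.index? arr mn).getD 0 : Nat)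
    if max_index + 1 == min_index then 4 else 3

-- ===== PRECONDITION & SPEC =====
def Spec_maxNtype (arr : List Int) (out : Int) : Prop := out = maxNtype_alt arr
instance (arr : List Int) (out : Int) : Decidable (Spec_maxNtype arr out) := by unfold Spec_maxNtype; infer_instance

-- ===== CLAIM (what is proved, stated in full; the proofs are below) =====
def Claim_equal_maxNtype : Prop := ∀ (arr : List Int), Dom_maxNtype arr → Spec_maxNtype arr (maxNtype arr)

-- ===== LEMMAS AND PROOFS =====

-- A's loop fires the desc-killing test somewhere iff the list is not weakly ascending.
lemma a_any_eq (arr : List Int) :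
    ((PySem.List.pyRange 1 (arr.length : Int) 1).any
      (fun i => decide (PySem.List.pyGetD arr i 0 < PySem.List.pyGetD arr (i-1) 0)) = true)
    ↔ ¬ List.IsChain (· ≤ ·) arr := by
  rw [List.any_eq_true]
  constructor
  · rintro ⟨i, hmem, hp⟩ hC
    obtain ⟨h1, h2⟩ := (PySem.List.mem_pyRange_one).mp hmem
    rw [PySem.List.pyGetD_eq_getElem arr 0 (by omega) h2,
        PySem.List.pyGetD_eq_getElem arr 0 (by omega) (by omega)] at hp
    have hd := List.isChain_iff_getElem.mp hC ((i-1).toNat) (by omega)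
    have hti : i.toNat = (i-1).toNat + 1 := by omega
    simp only [decide_eq_true_eq, hti] at hp
    omega
  · intro hC
    rw [List.isChain_iff_getElem] at hC
    push Not at hC
    obtain ⟨j, hj, hlt⟩ := hC
    refine ⟨(j : Int) + 1, (PySem.List.mem_pyRange_one).mpr (by omega), ?_⟩
    rw [PySem.List.pyGetD_eq_getElem arr 0 (by omega) (by omega),
        PySem.List.pyGetD_eq_getElem arr 0 (by omega) (by omega)]
    simp only [decide_eq_true_eq]
    have h1 : ((j : Int) + 1).toNat = j + 1 := by omega
    have h2 : ((j : Int) + 1 - 1).toNat = j := by omega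
    simp only [h1, h2]
    omega

-- Symmetric fact for the asc-killing test and weakly descending lists.
lemma a_any_eq' (arr : List Int) :
    ((PySem.List.pyRange 1 (arr.length : Int) 1).any
      (fun i => decide (PySem.List.pyGetD arr (i-1) 0 < PySem.List.pyGetD arr i 0)) = true)
    ↔ ¬ List.IsChain (· ≥ ·) arr := by
  rw [List.any_eq_true]
  constructor
  · rintro ⟨i, hmem, hp⟩ hC
    obtain ⟨h1, h2⟩ := (PySem.List.mem_pyRange_one).mp hmem
    rw [PySem.List.pyGetD_eq_getElem arr 0 (by omega) h2,
        PySem.List.pyGetD_eq_getElem arr 0 (by omega) (by omega)] at hp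
    have hd := List.isChain_iff_getElem.mp hC ((i-1).toNat) (by omega)
    have hti : i.toNat = (i-1).toNat + 1 := by omega
    simp only [decide_eq_true_eq, hti] at hp
    omega
  · intro hC
    rw [List.isChain_iff_getElem] at hC
    push Not at hC
    obtain ⟨j, hj, hlt⟩ := hC
    refine ⟨(j : Int) + 1, (PySem.List.mem_pyRange_one).mpr (by omega), ?_⟩
    rw [PySem.List.pyGetD_eq_getElem arr 0 (by omega) (by omega),
        PySem.List.pyGetD_eq_getElem arr 0 (by omega) (by omega)]
    simp only [decide_eq_true_eq]
    have h1 : ((j : Int) + 1).toNat = j + 1 := by omega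
    have h2 : ((j : Int) + 1 - 1).toNat = j := by omega
    simp only [h1, h2]
    omega

-- A's guard fold equals the two chain tests.
lemma a_fold_eq (arr : List Int) :
    (PySem.List.pyRange 1 (arr.length : Int) 1).foldl
      (fun st i =>
        if PySem.List.pyGetD arr i 0 > PySem.List.pyGetD arr (i-1) 0 then (st.1, false)
        else if PySem.List.pyGetD arr i 0 < PySem.List.pyGetD arr (i-1) 0 then (false, st.2)
        else st) ((true : Bool), (true : Bool)) =
      (decide (List.IsChain (· ≤ ·) arr), decide (List.IsChain (· ≥ ·) arr)) := by
  rw [PySem.List.foldl_congr_mem _ _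
    (fun st i => ((if (decide (PySem.List.pyGetD arr i 0 < PySem.List.pyGetD arr (i-1) 0)) = true then false else st.1),
                  (if (decide (PySem.List.pyGetD arr (i-1) 0 < PySem.List.pyGetD arr i 0)) = true then false else st.2)))
    _ ?_]
  · rw [PySem.List.foldl_prod_mk
          (f := fun b j => if (decide (PySem.List.pyGetD arr j 0 < PySem.List.pyGetD arr (j-1) 0)) = true then false else b)
          (g := fun b j => if (decide (PySem.List.pyGetD arr (j-1) 0 < PySem.List.pyGetD arr j 0)) = true then false else b),
        PySem.List.foldl_if_false_eq, PySem.List.foldl_if_false_eq]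
    simp only [Bool.true_and, Prod.mk.injEq]
    constructor
    · rw [Bool.eq_iff_iff]
      simp only [Bool.not_eq_true', ← Bool.not_eq_true, a_any_eq arr, decide_eq_true_eq]
      tauto
    · rw [Bool.eq_iff_iff]
      simp only [Bool.not_eq_true', ← Bool.not_eq_true, a_any_eq' arr, decide_eq_true_eq]
      tauto
  · intro st i _
    dsimp only
    rcases lt_trichotomy (PySem.List.pyGetD arr i 0) (PySem.List.pyGetD arr (i-1) 0) with h|h|h
    · simp [h, not_lt.mpr h.le]
    · simp [h]
    · simp [h, not_lt.mpr h.le]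

-- B's first test: arr equals its sorted copy exactly when it is weakly ascending.
lemma sorted_eq_iff_chain (l : List Int) :
    PySem.List.sorted l (fun x => x) false = l ↔ List.IsChain (· ≤ ·) l := by
  constructor
  · intro h
    have hp := PySem.List.sorted_pairwise l (fun x => x)
    rw [h] at hp
    exact List.isChain_iff_pairwise.mpr (by simpa using hp)
  · intro h
    exact PySem.List.sorted_eq_self_of_pairwise l (fun x => x)
      (by simpa using List.isChain_iff_pairwise.mp h)

-- B's second test: arr equals the reversed sorted copy exactly when it is weakly descending.
lemma sorted_rev_eq_iff_chain (l : List Int) :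
    (PySem.List.sorted l (fun x => x) false).reverse = l ↔ List.IsChain (· ≥ ·) l := by
  constructor
  · intro h
    have hp := PySem.List.sorted_pairwise l (fun x => x)
    have hp' : l.reverse.Pairwise (fun a b => a ≤ b) := by
      rw [← h, List.reverse_reverse]; simpa using hp
    rw [List.pairwise_reverse] at hp'
    exact List.isChain_iff_pairwise.mpr hp'
  · intro h
    have hp : l.reverse.Pairwise (fun a b : Int => a ≤ b) := by
      rw [List.pairwise_reverse]
      exact (List.isChain_iff_pairwise.mp h).imp (fun hab => hab)
    rw [PySem.List.sorted_id_eq_of_perm_of_pairwise l l.reverse (List.reverse_perm l) hp,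
        List.reverse_reverse]

-- head of the sorted copy is the minimum A computes.
lemma sorted_head_eq_min (a : Int) (rest : List Int) :
    PySem.List.pyGetD (PySem.List.sorted (a :: rest) (fun x => x) false) 0 0
      = rest.foldl min a := by
  rcases hs : PySem.List.sorted (a :: rest) (fun x => x) false with _ | ⟨m, t⟩
  · exact absurd ((PySem.List.sorted_eq_nil_iff _ _ _).mp hs) (by simp)
  · rw [PySem.List.pyGetD_zero_cons]
    have hle : ∀ y ∈ a :: rest, m ≤ y := PySem.List.key_head_sorted_le _ _ hs
    have hmem : m ∈ a :: rest := by
      rw [← PySem.List.mem_sorted (a :: rest) (fun x => x) false m, hs]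
      exact List.mem_cons_self
    have h1 : m ≤ rest.foldl min a := by
      rcases PySem.List.foldl_min_mem rest a with h|h
      · rw [h]; exact hle a List.mem_cons_self
      · exact hle _ (List.mem_cons_of_mem _ h)
    have h2 : rest.foldl min a ≤ m := by
      rcases List.mem_cons.mp hmem with h|h
      · rw [h]; exact (PySem.List.foldl_min_le rest a).1
      · exact (PySem.List.foldl_min_le rest a).2 _ h
    omega

-- last element of the sorted copy is the maximum A computes.
lemma sorted_last_eq_max (a : Int) (rest : List Int) :
    PySem.List.pyGetD (PySem.List.sorted (a :: rest) (fun x => x) false) (-1) 0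
      = rest.foldl max a := by
  have hne : PySem.List.sorted (a :: rest) (fun x => x) false ≠ [] := by
    rw [ne_eq, PySem.List.sorted_eq_nil_iff]; simp
  rw [PySem.List.pyGetD_neg_one _ _ hne]
  have h1 : (PySem.List.sorted (a :: rest) (fun x => x) false).getLast hne ≤ rest.foldl max a := by
    have hm : (PySem.List.sorted (a :: rest) (fun x => x) false).getLast hne ∈ a :: rest :=
      (PySem.List.mem_sorted _ _ _ _).mp (List.getLast_mem hne)
    rcases List.mem_cons.mp hm with h|h
    · rw [h]; exact (PySem.List.le_foldl_max rest a).1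
    · exact (PySem.List.le_foldl_max rest a).2 _ h
  have h2 : rest.foldl max a ≤ (PySem.List.sorted (a :: rest) (fun x => x) false).getLast hne := by
    have hm : rest.foldl max a ∈ PySem.List.sorted (a :: rest) (fun x => x) false := by
      rw [PySem.List.mem_sorted]
      rcases PySem.List.foldl_max_mem rest a with h|h
      · rw [h]; exact List.mem_cons_self
      · exact List.mem_cons_of_mem _ h
    obtain ⟨p, hp, hpe⟩ := List.mem_iff_getElem.mp hm
    rw [List.getLast_eq_getElem, ← hpe]
    exact PySem.List.sorted_id_getElem_mono (a :: rest) (by omega) (by omega)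
  omega

-- ===== VERDICT (by name: the statement is the Claim_ definition above) =====
theorem maxNtype_spec : Claim_equal_maxNtype := by
  unfold Claim_equal_maxNtype
  intro arr _
  unfold Spec_maxNtype
  cases arr with
  | nil => rfl
  | cons a rest =>
    unfold maxNtype maxNtype_alt
    dsimp only
    rw [a_fold_eq (a :: rest)]
    by_cases h1 : List.IsChain (· ≤ ·) (a :: rest)
    · have hs := (sorted_eq_iff_chain (a :: rest)).mpr h1
      simp [h1, hs]
    · have hs : ((a :: rest) == PySem.List.sorted (a :: rest) (fun x => x) false) = false := by
        simp only [beq_eq_false_iff_ne, ne_eq]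
        intro h; exact h1 ((sorted_eq_iff_chain _).mp h.symm)
      by_cases h2 : List.IsChain (· ≥ ·) (a :: rest)
      · have hr := (sorted_rev_eq_iff_chain (a :: rest)).mpr h2
        simp [h1, h2, hs, hr]
      · have hr : ((a :: rest) == (PySem.List.sorted (a :: rest) (fun x => x) false).reverse) = false := by
          simp only [beq_eq_false_iff_ne, ne_eq]
          intro h; exact h2 ((sorted_rev_eq_iff_chain _).mp h.symm)
        simp only [h1, h2, decide_false, Bool.false_eq_true, if_false, hs, hr,
                   PySem.List.min?_id_cons, PySem.List.max?_id_cons,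
                   sorted_head_eq_min, sorted_last_eq_max]
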